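-- pv_equiv track=rewrite | github.com/HCH725/HONGSTR | scripts/obsidian_common.py | _strategy_status_for_entries
-- ===== SOURCE A (Python) =====
-- from typing import Any
--
-- def _strategy_status_for_entries(
--     strategy_id: str,
--     entries: list[dict[str, Any]],
--     promoted: set[str],
--     demoted: set[str],
-- ) -> str:
--     candidate_ids = {str(entry.get("candidate_id")) for entry in entries if entry.get("candidate_id")}
--     if candidate_ids & promoted:
--         return "ADOPTED"
--     if candidate_ids & demoted:
--         return "REJECTED"
--     if entries:
--         return "CANDIDATE"
--     return "UNKNOWN"
-- ===== SOURCE B (Python) =====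
-- def _strategy_status_for_entries(
--     strategy_id,
--     entries,
--     promoted,
--     demoted,
-- ):
--     # Score each entry (3 = promoted hit, 2 = demoted hit, 1 = present),
--     # take the max (0 for no entries) and index a status table with it.
--     STATUS = ("UNKNOWN", "CANDIDATE", "REJECTED", "ADOPTED")
--
--     def rank(entry):
--         cid = entry.get("candidate_id")
--         if not cid:
--             return 1
--         cid = str(cid)
--         if cid in promoted:
--             return 3
--         if cid in demoted:
--             return 2
--         return 1
--
--     return STATUS[max(map(rank, entries), default=0)]
-- ===== Notes on version B (the rewrite author's own statement) =====
-- stated objective: alternative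
-- what changed: Replaces the collect-a-candidate-set-then-two-set-intersections-and-if-chain strategy with a scoring scheme: each entry is mapped to a numeric rank (3 promoted, 2 demoted, 1 present), the ranks are max-reduced (default 0), and the result indexes a status table.
import Mathlib
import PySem

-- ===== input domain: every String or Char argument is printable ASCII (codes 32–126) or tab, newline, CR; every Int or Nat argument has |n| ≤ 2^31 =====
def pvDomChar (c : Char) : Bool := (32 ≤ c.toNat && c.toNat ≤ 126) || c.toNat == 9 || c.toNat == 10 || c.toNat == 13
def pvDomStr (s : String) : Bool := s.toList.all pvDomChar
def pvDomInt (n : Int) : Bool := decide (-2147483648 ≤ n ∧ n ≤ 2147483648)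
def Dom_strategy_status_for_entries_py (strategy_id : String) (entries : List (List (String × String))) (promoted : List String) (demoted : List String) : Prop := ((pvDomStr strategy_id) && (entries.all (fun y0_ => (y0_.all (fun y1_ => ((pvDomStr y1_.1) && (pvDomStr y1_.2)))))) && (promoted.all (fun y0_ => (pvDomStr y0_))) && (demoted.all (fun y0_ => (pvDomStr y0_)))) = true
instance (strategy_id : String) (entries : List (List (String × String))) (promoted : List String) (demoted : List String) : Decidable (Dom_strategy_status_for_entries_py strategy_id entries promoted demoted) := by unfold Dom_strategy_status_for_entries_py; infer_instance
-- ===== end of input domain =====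

-- B replaces A's collect-candidate-set-then-intersect-and-if-chain strategy by scoring each
-- entry (3/2/1), max-reducing the scores and indexing a status table (objective: alternative).

-- ===== PORT A =====
-- set comprehension {str(e.get("candidate_id")) for e in entries if e.get("candidate_id")};
-- str() on the string value is the identity.  Set truthiness of `s & t` = nonempty intersection.
def strategy_status_for_entries_py (strategy_id : String) (entries : List (List (String × String))) (promoted : List String) (demoted : List String) : String :=
  let candidate_ids : PySem.Set String :=
    entries.foldl (fun s entry =>
      match List.lookup "candidate_id" entry with
      | some v => if v ≠ "" then PySem.Set.add s v else s
      | none => s) PySem.Set.empty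
  if PySem.Set.inter candidate_ids promoted ≠ [] then "ADOPTED"
  else if PySem.Set.inter candidate_ids demoted ≠ [] then "REJECTED"
  else if entries ≠ [] then "CANDIDATE"
  else "UNKNOWN"

-- ===== PORT B =====
-- `STATUS[max(map(rank, entries), default=0)]`; rank returns 1 for a missing/falsy
-- candidate_id, 3 for a promoted one, 2 for a demoted one, 1 otherwise.
def strategy_status_for_entries_py_alt (strategy_id : String) (entries : List (List (String × String))) (promoted : List String) (demoted : List String) : String :=
  let status : List String := ["UNKNOWN", "CANDIDATE", "REJECTED", "ADOPTED"]
  let rank : List (String × String) → Nat := fun entry =>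
    match List.lookup "candidate_id" entry with
    | some cid =>
        if cid = "" then 1
        else if promoted.contains cid then 3
        else if demoted.contains cid then 2
        else 1
    | none => 1
  -- the index is always < 4, so the Python tuple indexing never raises; getD is exact here
  status.getD ((entries.map rank).foldl Nat.max 0) "UNKNOWN"

-- ===== PRECONDITION & SPEC =====
def Spec_strategy_status_for_entries_py (strategy_id : String) (entries : List (List (String × String))) (promoted : List String) (demoted : List String) (out : String) : Prop := out = strategy_status_for_entries_py_alt strategy_id entries promoted demoted
instance (strategy_id : String) (entries : List (List (String × String))) (promoted : List String) (demoted : List String) (out : String) : Decidable (Spec_strategy_status_for_entries_py strategy_id entries promoted demoted out) := by unfold Spec_strategy_status_for_entries_py; infer_instance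

-- ===== CLAIM =====
def Claim_equal_strategy_status_for_entries_py : Prop := ∀ (strategy_id : String) (entries : List (List (String × String))) (promoted : List String) (demoted : List String), Dom_strategy_status_for_entries_py strategy_id entries promoted demoted → Spec_strategy_status_for_entries_py strategy_id entries promoted demoted (strategy_status_for_entries_py strategy_id entries promoted demoted)

-- ===== LEMMAS AND PROOFS =====

/-- One entry has a truthy candidate_id lying in `p`. -/
def pvEntryHit (p : List String) (e : List (String × String)) : Bool :=
  match List.lookup "candidate_id" e with
  | some v => (!(v = "")) && p.contains v
  | none => false

/-- Some entry has a truthy candidate_id lying in `p`. -/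
def pvHit (p : List String) (entries : List (List (String × String))) : Bool :=
  entries.any (pvEntryHit p)

theorem rank_eq (promoted demoted : List String) (e : List (String × String)) :
    (match List.lookup "candidate_id" e with
      | some cid =>
          if cid = "" then 1
          else if promoted.contains cid then 3
          else if demoted.contains cid then 2
          else 1
      | none => (1 : Nat))
    = if pvEntryHit promoted e then 3 else if pvEntryHit demoted e then 2 else 1 := by
  cases h : List.lookup "candidate_id" e with
  | none => simp [pvEntryHit, h]
  | some v =>
    by_cases hv : v = "" <;> simp [pvEntryHit, h, hv]

theorem fold_max (l : List Nat) : ∀ a : Nat, l.foldl Nat.max a = Nat.max a (l.foldl Nat.max 0) := by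
  induction l with
  | nil => intro a; simp
  | cons x xs ih =>
    intro a
    simp only [List.foldl_cons]
    rw [ih (Nat.max a x), ih (Nat.max 0 x)]
    simp [Nat.max_assoc]

theorem score_spec (P D : List String) :
    ∀ entries : List (List (String × String)),
      (entries.map (fun e => if pvEntryHit P e then 3 else if pvEntryHit D e then 2 else 1)).foldl Nat.max 0
      = if pvHit P entries then 3 else if pvHit D entries then 2 else if entries = [] then 0 else 1 := by
  intro entries
  induction entries with
  | nil => simp [pvHit]
  | cons e rest ih =>
    simp only [List.map_cons, List.foldl_cons, pvHit, List.any_cons]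
    rw [fold_max, ih]
    simp only [pvHit]
    by_cases hp : pvEntryHit P e <;> by_cases hd : pvEntryHit D e <;>
      by_cases hP : rest.any (pvEntryHit P) <;> by_cases hD : rest.any (pvEntryHit D) <;>
        by_cases hr : rest = [] <;> simp [hp, hd, hP, hD, hr]

theorem mem_collect :
    ∀ (entries : List (List (String × String))) (S : PySem.Set String) (x : String),
      x ∈ entries.foldl (fun s entry =>
        match List.lookup "candidate_id" entry with
        | some v => if v ≠ "" then PySem.Set.add s v else s
        | none => s) S
      ↔ x ∈ S ∨ ∃ e ∈ entries, ∃ v, List.lookup "candidate_id" e = some v ∧ ¬ v = "" ∧ x = v := by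
  intro entries
  induction entries with
  | nil => intro S x; simp
  | cons e rest ih =>
    intro S x
    simp only [List.foldl_cons, List.mem_cons]
    cases h : List.lookup "candidate_id" e with
    | none =>
      dsimp only
      rw [ih]
      constructor
      · rintro (hS | ⟨e', he', p⟩)
        · exact Or.inl hS
        · exact Or.inr ⟨e', Or.inr he', p⟩
      · rintro (hS | ⟨e', (rfl | he'), v, hv, hne, hx⟩)
        · exact Or.inl hS
        · rw [h] at hv; cases hv
        · exact Or.inr ⟨e', he', v, hv, hne, hx⟩
    | some v =>
      dsimp only
      by_cases hv : v = ""
      · rw [if_neg (by simp [hv]), ih]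
        constructor
        · rintro (hS | ⟨e', he', w, hw, hne, hx⟩)
          · exact Or.inl hS
          · exact Or.inr ⟨e', Or.inr he', w, hw, hne, hx⟩
        · rintro (hS | ⟨e', (rfl | he'), w, hw, hne, hx⟩)
          · exact Or.inl hS
          · rw [h] at hw; cases hw; exact absurd hv hne
          · exact Or.inr ⟨e', he', w, hw, hne, hx⟩
      · rw [if_pos (by simpa using hv), ih]
        constructor
        · rintro (hS | ⟨e', he', w, hw, hne, hx⟩)
          · rw [PySem.Set.mem_add] at hS
            rcases hS with hS | hxv
            · exact Or.inl hS
            · exact Or.inr ⟨e, Or.inl rfl, v, h, hv, hxv⟩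
          · exact Or.inr ⟨e', Or.inr he', w, hw, hne, hx⟩
        · rintro (hS | ⟨e', (rfl | he'), w, hw, hne, hx⟩)
          · exact Or.inl (by rw [PySem.Set.mem_add]; exact Or.inl hS)
          · rw [h] at hw; cases hw
            exact Or.inl (by rw [PySem.Set.mem_add]; exact Or.inr hx)
          · exact Or.inr ⟨e', he', w, hw, hne, hx⟩

theorem inter_ne_iff_hit (entries : List (List (String × String))) (p : List String) :
    (PySem.Set.inter
      (entries.foldl (fun s entry =>
        match List.lookup "candidate_id" entry with
        | some v => if v ≠ "" then PySem.Set.add s v else s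
        | none => s) PySem.Set.empty) p ≠ []) ↔ pvHit p entries = true := by
  rw [← List.isEmpty_eq_false_iff, List.isEmpty_eq_false_iff_exists_mem]
  constructor
  · rintro ⟨x, hx⟩
    rw [PySem.Set.mem_inter] at hx
    obtain ⟨hcol, hp⟩ := hx
    rcases (mem_collect entries PySem.Set.empty x).1 hcol with hS | ⟨e, he, v, hv, hne, hx⟩
    · simp [PySem.Set.empty] at hS
    · subst hx
      refine (List.any_eq_true).2 ⟨e, he, ?_⟩
      simp [pvEntryHit, hv, hne, hp]
  · intro h
    obtain ⟨e, he, hb⟩ := (List.any_eq_true).1 h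
    unfold pvEntryHit at hb
    cases hg : List.lookup "candidate_id" e with
    | none => rw [hg] at hb; simp at hb
    | some v =>
      rw [hg] at hb
      simp only [Bool.and_eq_true, Bool.not_eq_eq_eq_not, Bool.not_true, decide_eq_false_iff_not,
        List.contains_iff_mem] at hb
      obtain ⟨hne, hp⟩ := hb
      refine ⟨v, ?_⟩
      rw [PySem.Set.mem_inter]
      exact ⟨(mem_collect entries PySem.Set.empty v).2 (Or.inr ⟨e, he, v, hg, hne, rfl⟩), hp⟩

-- ===== VERDICT =====
theorem strategy_status_for_entries_py_spec : Claim_equal_strategy_status_for_entries_py := by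
  intro strategy_id entries promoted demoted _
  unfold Spec_strategy_status_for_entries_py strategy_status_for_entries_py
    strategy_status_for_entries_py_alt
  simp only [funext (rank_eq promoted demoted)]
  rw [score_spec]
  by_cases hp : pvHit promoted entries = true
  · rw [if_pos ((inter_ne_iff_hit entries promoted).2 hp)]
    simp [hp, List.getD]
  · rw [if_neg (fun h => hp ((inter_ne_iff_hit entries promoted).1 h))]
    by_cases hd : pvHit demoted entries = true
    · rw [if_pos ((inter_ne_iff_hit entries demoted).2 hd)]
      simp [hp, hd, List.getD]
    · rw [if_neg (fun h => hd ((inter_ne_iff_hit entries demoted).1 h))]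
      by_cases he : entries = []
      · simp [he, pvHit, List.getD]
      · simp [hp, hd, he, List.getD]
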